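-- pv_equiv track=rewrite | github.com/showjim/AOC2023 | Day2/AOC_2023_day1_part1.py | check_games
-- ===== SOURCE A (Python) =====
-- def check_games(games, red_cubes, green_cubes, blue_cubes):
--     possible_games = []
--
--     # Check each game
--     for game_id, subsets in games.items():
--         possible = True
--         # Check each subset of cubes
--         for subset in subsets:
--             if (subset['red'] > red_cubes or
--                 subset['green'] > green_cubes or
--                 subset['blue'] > blue_cubes):
--                 possible = False
--                 break
--         if possible:
--             possible_games.append(game_id)
--
--     return possible_games
-- ===== SOURCE B (Python) =====
-- def check_games(games, red_cubes, green_cubes, blue_cubes):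
--     result = []
--     for game_id, subsets in games.items():
--         if not subsets:
--             result.append(game_id)
--             continue
--         reds = [s['red'] for s in subsets]
--         greens = [s['green'] for s in subsets]
--         blues = [s['blue'] for s in subsets]
--         if max(reds) <= red_cubes and max(greens) <= green_cubes and max(blues) <= blue_cubes:
--             result.append(game_id)
--     return result
-- ===== Notes on version B (the rewrite author's own statement) =====
-- stated objective: alternative
-- what changed: Replaces A's subset-by-subset short-circuit possible/break scan with a reduce-then-compare shape: per-colour maxima over all subsets are computed and compared once against the limits.
-- outside the precondition, e.g. on check_games({1: [{'red': 5}]}, 0, 0, 0): A returns [], B raises KeyError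
import Mathlib
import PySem

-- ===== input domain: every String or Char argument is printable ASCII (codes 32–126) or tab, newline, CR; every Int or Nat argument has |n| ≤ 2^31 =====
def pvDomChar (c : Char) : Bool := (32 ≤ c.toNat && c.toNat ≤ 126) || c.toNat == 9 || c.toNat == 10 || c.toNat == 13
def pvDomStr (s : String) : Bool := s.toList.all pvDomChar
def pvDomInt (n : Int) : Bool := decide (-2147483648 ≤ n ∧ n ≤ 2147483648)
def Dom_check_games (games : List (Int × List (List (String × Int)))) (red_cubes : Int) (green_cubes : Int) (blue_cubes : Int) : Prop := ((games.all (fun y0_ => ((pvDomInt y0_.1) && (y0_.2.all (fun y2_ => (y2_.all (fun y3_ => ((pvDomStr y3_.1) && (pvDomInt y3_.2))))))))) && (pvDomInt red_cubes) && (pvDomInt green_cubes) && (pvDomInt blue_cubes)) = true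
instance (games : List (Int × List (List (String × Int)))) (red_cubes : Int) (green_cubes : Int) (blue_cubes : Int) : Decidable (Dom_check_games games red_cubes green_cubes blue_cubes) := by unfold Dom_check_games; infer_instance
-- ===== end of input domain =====

-- B replaces A's subset-by-subset short-circuit scan by per-colour maxima compared once against the limits (alternative decomposition, same cost).

-- ===== PORT A =====
-- subset['red'] etc.: KeyError inputs are excluded by Pre_check_games, so the .getD 0 default is never reached there and the lookup is exact.
def pvCol (s : List (String × Int)) (c : String) : Int := (PySem.Dict.get? (PySem.Dict.mk s) c).getD 0

-- the inner 'for subset in subsets: … break' loop of A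
def pvLoopA (subsets : List (List (String × Int))) (r g b : Int) : Bool :=
  match subsets with
  | [] => true
  | s :: rest =>
      if pvCol s "red" > r ∨ pvCol s "green" > g ∨ pvCol s "blue" > b then false
      else pvLoopA rest r g b

def check_games (games : List (Int × List (List (String × Int)))) (red_cubes : Int) (green_cubes : Int) (blue_cubes : Int) : List Int :=
  games.foldl (fun acc p => if pvLoopA p.2 red_cubes green_cubes blue_cubes then acc ++ [p.1] else acc) []

-- ===== PORT B =====
def check_games_alt (games : List (Int × List (List (String × Int)))) (red_cubes : Int) (green_cubes : Int) (blue_cubes : Int) : List Int :=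
  games.foldl (fun res p =>
    if p.2.isEmpty then res ++ [p.1]
    else
      let reds := p.2.map (fun s => pvCol s "red")
      let greens := p.2.map (fun s => pvCol s "green")
      let blues := p.2.map (fun s => pvCol s "blue")
      -- max(list) on a nonempty list: PySem.List.max? is some there, .getD 0 unreached
      if (PySem.List.max? reds (fun x => x)).getD 0 ≤ red_cubes ∧
         (PySem.List.max? greens (fun x => x)).getD 0 ≤ green_cubes ∧
         (PySem.List.max? blues (fun x => x)).getD 0 ≤ blue_cubes
      then res ++ [p.1] else res) []

-- ===== PRECONDITION & SPEC =====
-- Pre_ excludes inputs where some subset lacks a 'red'/'green'/'blue' key: B's full scan raises KeyError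
-- there, while A may either raise or return thanks to its short-circuit/break (an artefact of evaluation order).
def Pre_check_games (games : List (Int × List (List (String × Int)))) (red_cubes : Int) (green_cubes : Int) (blue_cubes : Int) : Prop :=
  games.all (fun p => p.2.all (fun s =>
    (PySem.Dict.get? (PySem.Dict.mk s) "red").isSome && (PySem.Dict.get? (PySem.Dict.mk s) "green").isSome && (PySem.Dict.get? (PySem.Dict.mk s) "blue").isSome)) = true
instance (games : List (Int × List (List (String × Int)))) (red_cubes : Int) (green_cubes : Int) (blue_cubes : Int) : Decidable (Pre_check_games games red_cubes green_cubes blue_cubes) := by unfold Pre_check_games; infer_instance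

def pvWitness_check_games : (List (Int × List (List (String × Int)))) × Int × Int × Int :=
  ([(1, [[("red", 1), ("green", 2), ("blue", 3)]]), (2, [])], 4, 4, 4)

def Spec_check_games (games : List (Int × List (List (String × Int)))) (red_cubes : Int) (green_cubes : Int) (blue_cubes : Int) (out : List Int) : Prop := out = check_games_alt games red_cubes green_cubes blue_cubes
instance (games : List (Int × List (List (String × Int)))) (red_cubes : Int) (green_cubes : Int) (blue_cubes : Int) (out : List Int) : Decidable (Spec_check_games games red_cubes green_cubes blue_cubes out) := by unfold Spec_check_games; infer_instance

-- ===== CLAIM (what is proved, stated in full; the proofs are below) =====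
def Claim_equal_check_games : Prop := ∀ (games : List (Int × List (List (String × Int)))) (red_cubes : Int) (green_cubes : Int) (blue_cubes : Int), Dom_check_games games red_cubes green_cubes blue_cubes → Pre_check_games games red_cubes green_cubes blue_cubes → Spec_check_games games red_cubes green_cubes blue_cubes (check_games games red_cubes green_cubes blue_cubes)

-- ===== LEMMAS AND PROOFS =====

lemma foldl_max_le (c x : Int) (t : List Int) :
    t.foldl max x ≤ c ↔ (x ≤ c ∧ ∀ y ∈ t, y ≤ c) := by
  induction t generalizing x with
  | nil => simp
  | cons h t ih =>
      simp only [List.foldl_cons, ih, List.mem_cons]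
      constructor
      · rintro ⟨hx, ht⟩
        exact ⟨le_trans (le_max_left _ _) hx,
               fun y hy => hy.elim (fun e => e ▸ le_trans (le_max_right _ _) hx) (ht y)⟩
      · rintro ⟨hx, ht⟩
        exact ⟨max_le hx (ht h (Or.inl rfl)), fun y hy => ht y (Or.inr hy)⟩

lemma loopA_iff (r g b : Int) (subsets : List (List (String × Int))) :
    pvLoopA subsets r g b = true ↔
      ∀ s ∈ subsets, pvCol s "red" ≤ r ∧ pvCol s "green" ≤ g ∧ pvCol s "blue" ≤ b := by
  induction subsets with
  | nil => simp [pvLoopA]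
  | cons s rest ih =>
      simp only [pvLoopA, List.mem_cons]
      split_ifs with h
      · simp only [false_iff]
        intro hall
        rcases hall s (Or.inl rfl) with ⟨h1, h2, h3⟩
        rcases h with h | h | h <;> omega
      · push Not at h
        simp only [ih]
        constructor
        · intro hall y hy
          rcases hy with e | hy
          · subst e; omega
          · exact hall y hy
        · intro hall y hy; exact hall y (Or.inr hy)

lemma step_eq (r g b : Int) (acc : List Int) (p : Int × List (List (String × Int))) :
    (if pvLoopA p.2 r g b then acc ++ [p.1] else acc) =
    (if p.2.isEmpty then acc ++ [p.1]
     else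
       if (PySem.List.max? (p.2.map (fun s => pvCol s "red")) (fun x => x)).getD 0 ≤ r ∧
          (PySem.List.max? (p.2.map (fun s => pvCol s "green")) (fun x => x)).getD 0 ≤ g ∧
          (PySem.List.max? (p.2.map (fun s => pvCol s "blue")) (fun x => x)).getD 0 ≤ b
       then acc ++ [p.1] else acc) := by
  rcases p with ⟨gid, subsets⟩
  cases subsets with
  | nil => simp [pvLoopA]
  | cons s0 rest =>
      simp only [List.isEmpty_cons, List.map_cons, PySem.List.max?_id_cons, Option.getD_some,
        if_neg (by simp : ¬ (false = true))]
      have hB : ((rest.map (fun s => pvCol s "red")).foldl max (pvCol s0 "red") ≤ r ∧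
                 (rest.map (fun s => pvCol s "green")).foldl max (pvCol s0 "green") ≤ g ∧
                 (rest.map (fun s => pvCol s "blue")).foldl max (pvCol s0 "blue") ≤ b) ↔
                pvLoopA (s0 :: rest) r g b = true := by
        rw [loopA_iff]
        simp only [foldl_max_le, List.mem_map]
        constructor
        · rintro ⟨⟨hr0, hr⟩, ⟨hg0, hg⟩, ⟨hb0, hb⟩⟩ s hs
          rcases List.mem_cons.mp hs with e | hs
          · subst e; exact ⟨hr0, hg0, hb0⟩
          · exact ⟨hr _ ⟨s, hs, rfl⟩, hg _ ⟨s, hs, rfl⟩, hb _ ⟨s, hs, rfl⟩⟩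
        · intro hall
          refine ⟨⟨(hall s0 (List.mem_cons_self)).1, ?_⟩,
                  ⟨(hall s0 (List.mem_cons_self)).2.1, ?_⟩,
                  ⟨(hall s0 (List.mem_cons_self)).2.2, ?_⟩⟩ <;>
            rintro y ⟨s, hs, rfl⟩
          · exact (hall s (List.mem_cons_of_mem _ hs)).1
          · exact (hall s (List.mem_cons_of_mem _ hs)).2.1
          · exact (hall s (List.mem_cons_of_mem _ hs)).2.2
      by_cases h : pvLoopA (s0 :: rest) r g b = true
      · rw [if_pos h, if_pos (hB.mpr h)]
      · rw [if_neg (by simpa using h), if_neg (fun hc => h (hB.mp hc))]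

lemma fold_eq (r g b : Int) (games : List (Int × List (List (String × Int)))) (acc : List Int) :
    games.foldl (fun acc p => if pvLoopA p.2 r g b then acc ++ [p.1] else acc) acc =
    games.foldl (fun res p =>
      if p.2.isEmpty then res ++ [p.1]
      else
        if (PySem.List.max? (p.2.map (fun s => pvCol s "red")) (fun x => x)).getD 0 ≤ r ∧
           (PySem.List.max? (p.2.map (fun s => pvCol s "green")) (fun x => x)).getD 0 ≤ g ∧
           (PySem.List.max? (p.2.map (fun s => pvCol s "blue")) (fun x => x)).getD 0 ≤ b
        then res ++ [p.1] else res) acc := by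
  induction games generalizing acc with
  | nil => rfl
  | cons p rest ih =>
      rw [List.foldl_cons, List.foldl_cons, step_eq]
      exact ih _

-- ===== VERDICT (by name: the statement is the Claim_ definition above) =====
theorem check_games_spec : Claim_equal_check_games := by
  intro games r g b _ _
  unfold Spec_check_games check_games check_games_alt
  exact fold_eq r g b games []
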